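-- pv_equiv track=rewrite | github.com/mike1729/BurnQED | python/data/generate_lean.py | _parenthesize_set_builders
-- ===== SOURCE A (Python) =====
-- def _parenthesize_set_builders(s: str) -> str:
--     """Wrap top-level set-builder `{...|...}` in parens, handling nesting."""
--     result = []
--     i = 0
--     while i < len(s):
--         if s[i] == '{' and (i == 0 or s[i-1] != '('):
--             # Find the matching closing brace (handling nesting)
--             depth = 1
--             j = i + 1
--             has_pipe = False
--             while j < len(s) and depth > 0:
--                 if s[j] == '{':
--                     depth += 1
--                 elif s[j] == '}':
--                     depth -= 1
--                 elif s[j] == '|' and depth == 1: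
--                     has_pipe = True
--                 j += 1
--             if depth == 0 and has_pipe:
--                 # Wrap {…|…} in parens
--                 result.append('(')
--                 result.append(s[i:j])
--                 result.append(')')
--                 i = j
--                 continue
--         result.append(s[i])
--         i += 1
--     return ''.join(result)
-- ===== SOURCE B (Python) =====
-- def _parenthesize_set_builders(s: str) -> str:
--     """One-pass rewrite: precompute matching-brace positions and depth-1 pipe
--     flags with a stack, then emit the output with O(1) lookups."""
--     n = len(s)
--     match = [-1] * n
--     pipe = [False] * n
--     stack = []
--     for j in range(n):
--         c = s[j]
--         if c == '{':
--             stack.append(j)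
--         elif c == '}':
--             if stack:
--                 match[stack.pop()] = j
--         elif c == '|':
--             if stack:
--                 pipe[stack[-1]] = True
--     out = []
--     i = 0
--     while i < n:
--         if s[i] == '{' and (i == 0 or s[i - 1] != '(') and match[i] >= 0 and pipe[i]:
--             j = match[i]
--             out.append('(')
--             out.append(s[i:j + 1])
--             out.append(')')
--             i = j + 1
--         else:
--             out.append(s[i])
--             i += 1
--     return ''.join(out)
-- ===== Notes on version B (the rewrite author's own statement) =====
-- stated objective: alternative
-- what changed: A re-scans forward from every opening brace to find its matching brace and a depth-1 pipe; B instead runs one stack pass over the string precomputing each brace's match position and depth-1 pipe flag, then emits the output in a single pass with constant-time lookups.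
import Mathlib
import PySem

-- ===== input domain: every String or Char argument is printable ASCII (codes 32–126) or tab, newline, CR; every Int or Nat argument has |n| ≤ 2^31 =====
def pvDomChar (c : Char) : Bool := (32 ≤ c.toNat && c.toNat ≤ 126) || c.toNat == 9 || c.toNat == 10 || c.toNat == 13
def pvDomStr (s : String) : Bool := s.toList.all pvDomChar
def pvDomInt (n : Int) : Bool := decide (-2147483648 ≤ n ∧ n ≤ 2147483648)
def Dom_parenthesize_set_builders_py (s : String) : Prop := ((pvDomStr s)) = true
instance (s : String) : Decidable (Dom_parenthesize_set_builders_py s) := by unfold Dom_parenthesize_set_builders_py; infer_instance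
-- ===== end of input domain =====

-- B replaces A's per-'{' rescans (a fresh matching-brace scan from every '{')
-- by one stack pass precomputing match positions and depth-1 pipe flags, then
-- emits the output with O(1) lookups (objective: alternative algorithm).

-- ===== PORT A =====

-- inner while loop of A: scan for the matching brace from j with given depth
def scanA (cs : List Char) (j depth : Nat) (hp : Bool) : Nat × Nat × Bool :=
  if h : j < cs.length ∧ 0 < depth then
    if cs[j]'h.1 = '{' then scanA cs (j+1) (depth+1) hp
    else if cs[j]'h.1 = '}' then scanA cs (j+1) (depth-1) hp
    else if cs[j]'h.1 = '|' ∧ depth = 1 then scanA cs (j+1) depth true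
    else scanA cs (j+1) depth hp
  else (j, depth, hp)
termination_by cs.length - j

-- outer while loop of A; acc is the result list (flattened to chars);
-- fuel only makes the recursion total (cs.length + 1 steps always suffice,
-- since every iteration advances i, by scanA_ge)
def loopA (cs : List Char) : Nat → Nat → List Char → List Char
  | 0, _, acc => acc
  | fuel+1, i, acc =>
    if h : i < cs.length then
      if cs[i]'h = '{' ∧ (i = 0 ∨ cs[i-1]! ≠ '(') then
        let r := scanA cs (i+1) 1 false
        if r.2.1 = 0 ∧ r.2.2 = true then
          -- s[i:j] is an in-range slice here (i ≤ r.1 ≤ len), exact as List.extract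
          loopA cs fuel r.1 (acc ++ '(' :: cs.extract i r.1 ++ [')'])
        else loopA cs fuel (i+1) (acc ++ [cs[i]'h])
      else loopA cs fuel (i+1) (acc ++ [cs[i]'h])
    else acc

def parenthesize_set_builders_py (s : String) : String :=
  String.ofList (loopA s.toList (s.toList.length + 1) 0 [])

-- ===== PORT B =====

-- body of B's first for-loop: one step of the stack pass at position j
def stepB (cs : List Char) (σ : List Int × List Bool × List Nat) (j : Nat) :
    List Int × List Bool × List Nat :=
  if cs[j]! = '{' then (σ.1, σ.2.1, j :: σ.2.2)
  else if cs[j]! = '}' then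
    match σ.2.2 with
    | [] => σ
    | q :: rest => (σ.1.set q (j : Int), σ.2.1, rest)
  else if cs[j]! = '|' then
    match σ.2.2 with
    | [] => σ
    | q :: rest => (σ.1, σ.2.1.set q true, q :: rest)
  else σ

-- B's second while loop; fuel only makes the recursion total (cs.length + 1
-- steps always suffice, as the equivalence proof shows)
def loopB (cs : List Char) (m : List Int) (p : List Bool) :
    Nat → Nat → List Char → List Char
  | 0, _, acc => acc
  | fuel+1, i, acc =>
    if h : i < cs.length then
      if cs[i]'h = '{' ∧ (i = 0 ∨ cs[i-1]! ≠ '(') ∧ 0 ≤ m[i]! ∧ p[i]! = true then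
        loopB cs m p fuel ((m[i]!).toNat + 1)
          (acc ++ '(' :: cs.extract i ((m[i]!).toNat + 1) ++ [')'])
      else loopB cs m p fuel (i+1) (acc ++ [cs[i]'h])
    else acc

def parenthesize_set_builders_py_alt (s : String) : String :=
  let cs := s.toList
  let σ := List.foldl (stepB cs)
      (List.replicate cs.length (-1), List.replicate cs.length false, ([] : List Nat))
      (List.range cs.length)
  String.ofList (loopB cs σ.1 σ.2.1 (cs.length + 1) 0 [])

-- ===== PRECONDITION & SPEC =====
def Spec_parenthesize_set_builders_py (s : String) (out : String) : Prop := out = parenthesize_set_builders_py_alt s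
instance (s : String) (out : String) : Decidable (Spec_parenthesize_set_builders_py s out) := by unfold Spec_parenthesize_set_builders_py; infer_instance

-- ===== CLAIM (what is proved, stated in full; the proofs are below) =====
def Claim_equal_parenthesize_set_builders_py : Prop := ∀ (s : String), Dom_parenthesize_set_builders_py s → Spec_parenthesize_set_builders_py s (parenthesize_set_builders_py s)

-- ===== LEMMAS AND PROOFS =====

-- every iteration of the output loops advances i: the scan result is ≥ its start
theorem scanA_ge_aux (k : Nat) : ∀ (cs : List Char) (j depth : Nat) (hp : Bool),
    cs.length - j ≤ k → j ≤ (scanA cs j depth hp).1 := by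
  induction k with
  | zero =>
    intro cs j depth hp hk
    rw [scanA]
    split
    · omega
    · simp
  | succ k ih =>
    intro cs j depth hp hk
    rw [scanA]
    split
    · split
      · exact le_trans (by omega) (ih cs (j+1) _ hp (by omega))
      · split
        · exact le_trans (by omega) (ih cs (j+1) _ hp (by omega))
        · split
          · exact le_trans (by omega) (ih cs (j+1) _ true (by omega))
          · exact le_trans (by omega) (ih cs (j+1) _ hp (by omega))
    · simp

theorem scanA_ge (cs : List Char) (j depth : Nat) (hp : Bool) :
    j ≤ (scanA cs j depth hp).1 :=
  scanA_ge_aux (cs.length - j) cs j depth hp (le_refl _)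

theorem scanA_le_length_aux (k : Nat) : ∀ (cs : List Char) (j depth : Nat) (hp : Bool),
    cs.length - j ≤ k → j ≤ cs.length → (scanA cs j depth hp).1 ≤ cs.length := by
  induction k with
  | zero =>
    intro cs j depth hp hk hj
    rw [scanA]
    split
    · omega
    · simpa using hj
  | succ k ih =>
    intro cs j depth hp hk hj
    rw [scanA]
    split
    · rename_i h
      split
      · exact ih cs (j+1) _ hp (by omega) (by omega)
      · split
        · exact ih cs (j+1) _ hp (by omega) (by omega)
        · split
          · exact ih cs (j+1) _ true (by omega) (by omega)
          · exact ih cs (j+1) _ hp (by omega) (by omega)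
    · simpa using hj

theorem scanA_le_length (cs : List Char) (j depth : Nat) (hp : Bool) (hj : j ≤ cs.length) :
    (scanA cs j depth hp).1 ≤ cs.length :=
  scanA_le_length_aux (cs.length - j) cs j depth hp (le_refl _) hj

theorem scanA_step (cs : List Char) (j d : Nat) (hp : Bool) (hj : j < cs.length) (hd : 0 < d) :
    scanA cs j d hp =
      if cs[j] = '{' then scanA cs (j+1) (d+1) hp
      else if cs[j] = '}' then scanA cs (j+1) (d-1) hp
      else if cs[j] = '|' ∧ d = 1 then scanA cs (j+1) d true
      else scanA cs (j+1) d hp := by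
  rw [scanA]; simp [hj, hd]

theorem scanA_stop (cs : List Char) (j d : Nat) (hp : Bool) (h : ¬(j < cs.length ∧ 0 < d)) :
    scanA cs j d hp = (j, d, hp) := by
  rw [scanA]; simp [h]

-- the invariant of B's stack pass after processing positions < t:
-- resume equations tie every pending open brace to A's inner scan
def StackInv (cs : List Char) (t : Nat) (m : List Int) (p : List Bool) (st : List Nat) : Prop :=
  m.length = cs.length ∧ p.length = cs.length ∧
  st.Pairwise (· > ·) ∧
  (∀ q ∈ st, q < t ∧ q < cs.length) ∧
  (∀ r, (h : r < st.length) → m[st[r]]! = -1 ∧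
      scanA cs (st[r] + 1) 1 false = scanA cs t (r + 1) (p[st[r]]!)) ∧
  (∀ q, q < cs.length → t ≤ q → m[q]! = -1 ∧ p[q]! = false) ∧
  (∀ q, (h : q < cs.length) → cs[q] = '{' → q < t → q ∉ st →
      0 ≤ m[q]! ∧ scanA cs (q + 1) 1 false = ((m[q]!).toNat + 1, 0, p[q]!))

theorem inv_init (cs : List Char) :
    StackInv cs 0 (List.replicate cs.length (-1)) (List.replicate cs.length false) [] := by
  refine ⟨by simp, by simp, by simp, by simp, by simp, ?_, by omega⟩
  intro q hq _
  simp [hq]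

theorem inv_step (cs : List Char) (t : Nat) (m : List Int) (p : List Bool) (st : List Nat)
    (ht : t < cs.length) (h : StackInv cs t m p st) :
    StackInv cs (t+1) (stepB cs (m, p, st) t).1 (stepB cs (m, p, st) t).2.1 (stepB cs (m, p, st) t).2.2 := by
  obtain ⟨hm, hp, hpw, hst, hS, hU, hF⟩ := h
  have hbang : cs[t]! = cs[t] := getElem!_pos cs t ht
  by_cases hob : cs[t] = '{'
  · -- push
    have hstep : stepB cs (m, p, st) t = (m, p, t :: st) := by
      simp [stepB, hbang, hob]
    rw [hstep]
    refine ⟨hm, hp, ?_, ?_, ?_, ?_, ?_⟩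
    · exact List.pairwise_cons.mpr ⟨fun q hq => (hst q hq).1, hpw⟩
    · intro q hq
      rcases List.mem_cons.mp hq with rfl | hq
      · exact ⟨by omega, ht⟩
      · exact ⟨by have := (hst q hq).1; omega, (hst q hq).2⟩
    · intro r hr
      match r with
      | 0 =>
        simp only [List.getElem_cons_zero]
        refine ⟨(hU t ht (le_refl t)).1, ?_⟩
        rw [(hU t ht (le_refl t)).2]
      | r+1 =>
        have hr' : r < st.length := by simpa using hr
        simp only [List.getElem_cons_succ]
        refine ⟨(hS r hr').1, ?_⟩
        rw [(hS r hr').2, scanA_step cs t (r+1) _ ht (by omega)]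
        simp [hob]
    · intro q hq htq; exact hU q hq (by omega)
    · intro q hq hcq hqt hqnotin
      have hq' : q ∉ st := fun hmem => hqnotin (List.mem_cons_of_mem _ hmem)
      have hqt' : q < t := by
        rcases Nat.lt_succ_iff_lt_or_eq.mp hqt with h | rfl
        · exact h
        · exact absurd (List.mem_cons_self ..) hqnotin
      exact hF q hq hcq hqt' hq'
  · by_cases hcb : cs[t] = '}'
    · -- pop
      rcases st with _ | ⟨q0, rest⟩
      · have hstep : stepB cs (m, p, ([] : List Nat)) t = (m, p, []) := by
          simp [stepB, hbang, hcb]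
        rw [hstep]
        refine ⟨hm, hp, hpw, by simp, by simp, ?_, ?_⟩
        · intro q hq htq; exact hU q hq (by omega)
        · intro q hq hcq hqt _
          have hqt' : q < t := by
            rcases Nat.lt_succ_iff_lt_or_eq.mp hqt with h | rfl
            · exact h
            · exact absurd hcq (by simp [hcb])
          exact hF q hq hcq hqt' (by simp)
      · have hstep : stepB cs (m, p, q0 :: rest) t = (m.set q0 (t : Int), p, rest) := by
          simp [stepB, hbang, hcb]
        rw [hstep]
        have hq0 := hst q0 (List.mem_cons_self ..)
        have hq0S := hS 0 (by simp)
        simp only [List.getElem_cons_zero] at hq0S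
        have hq0new : scanA cs (q0 + 1) 1 false = (t + 1, 0, p[q0]!) := by
          rw [hq0S.2, scanA_step cs t 1 _ ht (by omega)]
          simp [hcb, scanA_stop cs (t+1) 0 _ (by omega)]
        have hmlen : q0 < m.length := by rw [hm]; exact hq0.2
        have hmset_self : (m.set q0 (t : Int))[q0]! = (t : Int) := by
          rw [getElem!_pos _ q0 (by simpa using hmlen)]
          simp
        have hmset_ne : ∀ q, q ≠ q0 → (m.set q0 (t : Int))[q]! = m[q]! := by
          intro q hne
          by_cases hql : q < m.length
          · rw [getElem!_pos _ q (by simpa using hql), getElem!_pos _ q hql]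
            exact List.getElem_set_ne (by omega) _
          · rw [getElem!_neg _ q (by simpa using hql), getElem!_neg _ q hql]
        have hdistinct : ∀ q ∈ rest, q ≠ q0 := by
          intro q hq
          have := (List.pairwise_cons.mp hpw).1 q hq; omega
        refine ⟨by simp [hm], hp, (List.pairwise_cons.mp hpw).2, ?_, ?_, ?_, ?_⟩
        · intro q hq
          have := hst q (List.mem_cons_of_mem _ hq); exact ⟨by omega, this.2⟩
        · intro r hr
          have hr' : r + 1 < (q0 :: rest).length := by simpa using hr
          have hSr := hS (r+1) hr'
          simp only [List.getElem_cons_succ] at hSr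
          refine ⟨?_, ?_⟩
          · rw [hmset_ne _ (hdistinct _ (List.getElem_mem hr))]; exact hSr.1
          · rw [hSr.2, scanA_step cs t (r+2) _ ht (by omega)]
            simp [hcb]
        · intro q hq htq
          have := hU q hq (by omega)
          refine ⟨?_, this.2⟩
          rw [hmset_ne _ (by omega)]; exact this.1
        · intro q hq hcq hqt hqnotin
          by_cases hqq0 : q = q0
          · subst hqq0
            refine ⟨by rw [hmset_self]; positivity, ?_⟩
            rw [hmset_self, hq0new]; simp
          · have hqt' : q < t := by
              rcases Nat.lt_succ_iff_lt_or_eq.mp hqt with h | rfl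
              · exact h
              · exact absurd hcq (by simp [hcb])
            have hqst : q ∉ q0 :: rest := by
              intro hmem
              rcases List.mem_cons.mp hmem with rfl | hmem
              · exact hqq0 rfl
              · exact hqnotin hmem
            have := hF q hq hcq hqt' hqst
            rw [hmset_ne _ hqq0]; exact this
    · by_cases hpb : cs[t] = '|'
      · -- pipe flag
        rcases st with _ | ⟨q0, rest⟩
        · have hstep : stepB cs (m, p, ([] : List Nat)) t = (m, p, []) := by
            simp [stepB, hbang, hpb]
          rw [hstep]
          refine ⟨hm, hp, hpw, by simp, by simp, ?_, ?_⟩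
          · intro q hq htq; exact hU q hq (by omega)
          · intro q hq hcq hqt _
            have hqt' : q < t := by
              rcases Nat.lt_succ_iff_lt_or_eq.mp hqt with h | rfl
              · exact h
              · exact absurd hcq (by simp [hpb])
            exact hF q hq hcq hqt' (by simp)
        · have hstep : stepB cs (m, p, q0 :: rest) t = (m, p.set q0 true, q0 :: rest) := by
            simp [stepB, hbang, hpb]
          rw [hstep]
          have hq0 := hst q0 (List.mem_cons_self ..)
          have hplen : q0 < p.length := by rw [hp]; exact hq0.2
          have hpset_self : (p.set q0 true)[q0]! = true := by
            rw [getElem!_pos _ q0 (by simpa using hplen)]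
            simp
          have hpset_ne : ∀ q, q ≠ q0 → (p.set q0 true)[q]! = p[q]! := by
            intro q hne
            by_cases hql : q < p.length
            · rw [getElem!_pos _ q (by simpa using hql), getElem!_pos _ q hql]
              exact List.getElem_set_ne (by omega) _
            · rw [getElem!_neg _ q (by simpa using hql), getElem!_neg _ q hql]
          have hdistinct : ∀ q ∈ rest, q ≠ q0 := by
            intro q hq
            have := (List.pairwise_cons.mp hpw).1 q hq; omega
          refine ⟨hm, by simp [hp], hpw, ?_, ?_, ?_, ?_⟩
          · intro q hq
            have := hst q hq; exact ⟨by omega, this.2⟩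
          · intro r hr
            have hSr := hS r hr
            match r with
            | 0 =>
              simp only [List.getElem_cons_zero] at hSr ⊢
              refine ⟨hSr.1, ?_⟩
              rw [hpset_self, hSr.2, scanA_step cs t 1 _ ht (by omega)]
              simp [hpb]
            | r+1 =>
              simp only [List.getElem_cons_succ] at hSr ⊢
              rw [hpset_ne _ (hdistinct _ (List.getElem_mem (by simpa using hr)))]
              refine ⟨hSr.1, ?_⟩
              rw [hSr.2, scanA_step cs t (r+2) _ ht (by omega)]
              simp [hpb]
          · intro q hq htq
            have := hU q hq (by omega)
            refine ⟨this.1, ?_⟩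
            rw [hpset_ne _ (by omega)]; exact this.2
          · intro q hq hcq hqt hqnotin
            have hqt' : q < t := by
              rcases Nat.lt_succ_iff_lt_or_eq.mp hqt with h | rfl
              · exact h
              · exact absurd hcq (by simp [hpb])
            have hq0ne : q ≠ q0 := by
              intro hEq; subst hEq
              exact hqnotin (List.mem_cons_self ..)
            have := hF q hq hcq hqt' hqnotin
            rw [hpset_ne _ hq0ne]; exact this
      · -- ordinary character
        have hstep : stepB cs (m, p, st) t = (m, p, st) := by
          simp [stepB, hbang, hob, hcb, hpb]
        rw [hstep]
        refine ⟨hm, hp, hpw, ?_, ?_, ?_, ?_⟩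
        · intro q hq; have := hst q hq; exact ⟨by omega, this.2⟩
        · intro r hr
          refine ⟨(hS r hr).1, ?_⟩
          rw [(hS r hr).2, scanA_step cs t (r+1) _ ht (by omega)]
          simp [hob, hcb, hpb]
        · intro q hq htq; exact hU q hq (by omega)
        · intro q hq hcq hqt hqnotin
          have hqt' : q < t := by
            rcases Nat.lt_succ_iff_lt_or_eq.mp hqt with h | rfl
            · exact h
            · exact absurd hcq hob
          exact hF q hq hcq hqt' hqnotin

theorem inv_foldl (cs : List Char) (t : Nat) (ht : t ≤ cs.length) :
    StackInv cs t
      (List.foldl (stepB cs)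
        (List.replicate cs.length (-1), List.replicate cs.length false, ([] : List Nat))
        (List.range t)).1
      (List.foldl (stepB cs)
        (List.replicate cs.length (-1), List.replicate cs.length false, ([] : List Nat))
        (List.range t)).2.1
      (List.foldl (stepB cs)
        (List.replicate cs.length (-1), List.replicate cs.length false, ([] : List Nat))
        (List.range t)).2.2 := by
  induction t with
  | zero => simpa using inv_init cs
  | succ t ih =>
    rw [List.range_succ, List.foldl_append]
    have := inv_step cs t _ _ _ (by omega) (ih (by omega))
    simpa using this

-- the final facts pass 2 needs about each '{' position
theorem final_fact (cs : List Char) (m : List Int) (p : List Bool) (st : List Nat)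
    (h : StackInv cs cs.length m p st) (i : Nat) (hi : i < cs.length) (hc : cs[i] = '{') :
    (0 ≤ m[i]! ∧ scanA cs (i+1) 1 false = ((m[i]!).toNat + 1, 0, p[i]!)) ∨
    (m[i]! = -1 ∧ (scanA cs (i+1) 1 false).2.1 ≠ 0) := by
  obtain ⟨hm, hp, hpw, hst, hS, hU, hF⟩ := h
  by_cases hmem : i ∈ st
  · right
    obtain ⟨r, hr, hEq⟩ := List.getElem_of_mem hmem
    subst hEq
    have := hS r hr
    refine ⟨this.1, ?_⟩
    rw [this.2, scanA_stop cs cs.length (r+1) _ (by omega)]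
    simp
  · exact Or.inl (hF i hi hc hi hmem)

-- simulation of the two output loops
theorem sim (cs : List Char) (m : List Int) (p : List Bool)
    (hf : ∀ i, (h : i < cs.length) → cs[i] = '{' →
      (0 ≤ m[i]! ∧ scanA cs (i+1) 1 false = ((m[i]!).toNat + 1, 0, p[i]!)) ∨
      (m[i]! = -1 ∧ (scanA cs (i+1) 1 false).2.1 ≠ 0)) :
    ∀ k i acc fuelA fuel, cs.length - i ≤ k → i ≤ cs.length →
      cs.length + 1 - i ≤ fuelA → cs.length + 1 - i ≤ fuel →
      loopA cs fuelA i acc = loopB cs m p fuel i acc := by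
  intro k
  induction k with
  | zero =>
    intro i acc fuelA fuel hk hi hfA hfuel
    have hie : ¬ i < cs.length := by omega
    obtain ⟨fa, rfl⟩ : ∃ fa, fuelA = fa + 1 := ⟨fuelA - 1, by omega⟩
    obtain ⟨f, rfl⟩ : ∃ f, fuel = f + 1 := ⟨fuel - 1, by omega⟩
    rw [loopA, loopB]
    simp [hie]
  | succ k ih =>
    intro i acc fuelA fuel hk hi hfA hfuel
    obtain ⟨fa, rfl⟩ : ∃ fa, fuelA = fa + 1 := ⟨fuelA - 1, by omega⟩
    obtain ⟨f, rfl⟩ : ∃ f, fuel = f + 1 := ⟨fuel - 1, by omega⟩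
    by_cases hlt : i < cs.length
    · rw [loopA, loopB]
      by_cases hcond : cs[i] = '{' ∧ (i = 0 ∨ cs[i-1]! ≠ '(')
      · rcases hf i hlt hcond.1 with ⟨hm0, hscan⟩ | ⟨hm1, hd⟩
        · by_cases hpi : p[i]! = true
          · -- both wrap
            have hge : i + 1 ≤ (m[i]!).toNat + 1 := by
              have := scanA_ge cs (i+1) 1 false
              rw [hscan] at this; exact this
            have hle : (m[i]!).toNat + 1 ≤ cs.length := by
              have := scanA_le_length cs (i+1) 1 false (by omega)
              rw [hscan] at this; exact this
            simp only [dif_pos hlt, hscan, hpi, hcond, if_pos, and_true, hm0]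
            exact ih ((m[i]!).toNat + 1) _ fa f (by omega) (by omega) (by omega) (by omega)
          · -- pipe flag false: both emit one char
            simp only [dif_pos hlt]
            rw [if_pos hcond, if_neg (by simp [hscan, hpi]),
              if_neg (fun hB => hpi hB.2.2.2)]
            exact ih (i+1) _ fa f (by omega) (by omega) (by omega) (by omega)
        · -- unmatched brace: both emit one char
          simp only [dif_pos hlt]
          rw [if_pos hcond, if_neg (by simp [hd]),
            if_neg (fun hB => by have := hB.2.2.1; omega)]
          exact ih (i+1) _ fa f (by omega) (by omega) (by omega) (by omega)
      · -- not a candidate position: both emit one char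
        simp only [dif_pos hlt]
        rw [if_neg hcond, if_neg (fun hB => hcond ⟨hB.1, hB.2.1⟩)]
        exact ih (i+1) _ fa f (by omega) (by omega) (by omega) (by omega)
    · rw [loopA, loopB]; simp [hlt]

-- ===== VERDICT (by name: the statement is the Claim_ definition above) =====
theorem parenthesize_set_builders_py_spec : Claim_equal_parenthesize_set_builders_py := by
  intro s _
  unfold Spec_parenthesize_set_builders_py parenthesize_set_builders_py
  show String.ofList (loopA s.toList (s.toList.length + 1) 0 []) =
    String.ofList (loopB s.toList
      (List.foldl (stepB s.toList)
        (List.replicate s.toList.length (-1), List.replicate s.toList.length false, ([] : List Nat))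
        (List.range s.toList.length)).1
      (List.foldl (stepB s.toList)
        (List.replicate s.toList.length (-1), List.replicate s.toList.length false, ([] : List Nat))
        (List.range s.toList.length)).2.1
      (s.toList.length + 1) 0 [])
  have hinv := inv_foldl s.toList s.toList.length (le_refl _)
  exact congrArg String.ofList
    (sim s.toList _ _ (fun i hi hc => final_fact s.toList _ _ _ hinv i hi hc)
      s.toList.length 0 [] (s.toList.length + 1) (s.toList.length + 1)
      (by omega) (by omega) (by omega) (by omega))
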